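-- pv_equiv track=rewrite | github.com/tummfm/pepmorph | descriptor_calc/pepfold_pipeline/generate_pep_dataset.py | compute_net_charge
-- ===== SOURCE A (Python) =====
-- def compute_net_charge(sequence):
--     """
--     Compute the net charge of the peptide based on its sequence.
--     Assume pH 7: +1 for K,R; -1 for D,E.
--     """
--     charge = 0
--     for aa in sequence:
--         if aa.upper() in ['K', 'R']:
--             charge += 1
--         elif aa.upper() in ['D', 'E']:
--             charge -= 1
--     return charge
-- ===== SOURCE B (Python) =====
-- from collections import Counter
--
-- def compute_net_charge(sequence):
--     counts = Counter(aa.upper() for aa in sequence)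
--     return counts['K'] + counts['R'] - counts['D'] - counts['E']
-- ===== Notes on version B (the rewrite author's own statement) =====
-- stated objective: simpler
-- what changed: Replaces the per-character branching accumulator loop with a Counter frequency table built in one pass and a closed-form combination of four lookups.
import Mathlib
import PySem

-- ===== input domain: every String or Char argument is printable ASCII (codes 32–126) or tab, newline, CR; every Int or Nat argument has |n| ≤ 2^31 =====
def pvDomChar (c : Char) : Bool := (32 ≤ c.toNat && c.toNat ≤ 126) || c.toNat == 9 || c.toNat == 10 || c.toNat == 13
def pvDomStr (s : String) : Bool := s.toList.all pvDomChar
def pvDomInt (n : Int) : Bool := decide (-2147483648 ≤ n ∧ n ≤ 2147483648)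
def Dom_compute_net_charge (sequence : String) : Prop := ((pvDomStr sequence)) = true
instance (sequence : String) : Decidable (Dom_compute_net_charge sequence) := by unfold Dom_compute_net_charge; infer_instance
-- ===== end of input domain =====

-- B replaces A's per-character branching accumulator with a Counter frequency table
-- combined in closed form from four lookups (objective: simpler decomposition).

-- ===== PORT A =====
def compute_net_charge (sequence : String) : Int :=
  sequence.toList.foldl (fun charge aa =>
    if PySem.Chars.upperChar aa ∈ ['K', 'R'] then charge + 1
    else if PySem.Chars.upperChar aa ∈ ['D', 'E'] then charge - 1
    else charge) 0

-- ===== PORT B =====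
def compute_net_charge_alt (sequence : String) : Int :=
  let counts := PySem.Dict.counter (sequence.toList.map PySem.Chars.upperChar)
  counts.getD 'K' 0 + counts.getD 'R' 0 - counts.getD 'D' 0 - counts.getD 'E' 0

-- ===== PRECONDITION & SPEC =====
def Spec_compute_net_charge (sequence : String) (out : Int) : Prop := out = compute_net_charge_alt sequence
instance (sequence : String) (out : Int) : Decidable (Spec_compute_net_charge sequence out) := by unfold Spec_compute_net_charge; infer_instance

-- ===== CLAIM (what is proved, stated in full; the proofs are below) =====
def Claim_equal_compute_net_charge : Prop := ∀ (sequence : String), Dom_compute_net_charge sequence → Spec_compute_net_charge sequence (compute_net_charge sequence)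

-- ===== LEMMAS AND PROOFS =====
theorem foldl_charge (l : List Char) (c : Int) :
    l.foldl (fun charge aa =>
      if PySem.Chars.upperChar aa ∈ ['K', 'R'] then charge + 1
      else if PySem.Chars.upperChar aa ∈ ['D', 'E'] then charge - 1
      else charge) c
    = c + ((l.map PySem.Chars.upperChar).count 'K' + (l.map PySem.Chars.upperChar).count 'R'
         - (l.map PySem.Chars.upperChar).count 'D' - (l.map PySem.Chars.upperChar).count 'E') := by
  induction l generalizing c with
  | nil => simp
  | cons a t ih =>
    simp only [List.foldl_cons, List.map_cons, ih]
    by_cases hK : PySem.Chars.upperChar a = 'K' <;>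
    by_cases hR : PySem.Chars.upperChar a = 'R' <;>
    by_cases hD : PySem.Chars.upperChar a = 'D' <;>
    by_cases hE : PySem.Chars.upperChar a = 'E' <;>
    simp_all <;> omega

-- ===== VERDICT (by name: the statement is the Claim_ definition above) =====
theorem compute_net_charge_spec : Claim_equal_compute_net_charge := by
  intro s _
  unfold Spec_compute_net_charge compute_net_charge compute_net_charge_alt
  rw [foldl_charge]
  simp [PySem.Dict.getD_counter]
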